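-- pv_equiv track=rewrite | github.com/leemimi/CodingTest | 백준/Gold/2922. 즐거운 단어/즐거운 단어.py | check
-- ===== SOURCE A (Python) =====
-- mo = {'a', 'i', 'e', 'o', 'u'}
--
-- def check(w):
--     if 'l' not in w:
--         return False
--     for i in range(1, len(w)-1):
--         if w[i] in mo and w[i+1] in mo and w[i-1] in mo:
--             return False
--         if w[i] not in mo and w[i+1] not in mo and w[i-1] not in mo:
--             return False
--     return True
-- ===== SOURCE B (Python) =====
-- mo = {'a', 'i', 'e', 'o', 'u'}
--
-- def check(w):
--     pat = ''.join('V' if c in mo else 'C' for c in w)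
--     return 'l' in w and 'VVV' not in pat and 'CCC' not in pat
-- ===== Notes on version B (the rewrite author's own statement) =====
-- stated objective: simpler
-- what changed: B maps the word to a vowel/consonant class string and uses substring search ('VVV'/'CCC' not in pat) instead of A's explicit index-window loop over w[i-1], w[i], w[i+1].
import Mathlib
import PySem

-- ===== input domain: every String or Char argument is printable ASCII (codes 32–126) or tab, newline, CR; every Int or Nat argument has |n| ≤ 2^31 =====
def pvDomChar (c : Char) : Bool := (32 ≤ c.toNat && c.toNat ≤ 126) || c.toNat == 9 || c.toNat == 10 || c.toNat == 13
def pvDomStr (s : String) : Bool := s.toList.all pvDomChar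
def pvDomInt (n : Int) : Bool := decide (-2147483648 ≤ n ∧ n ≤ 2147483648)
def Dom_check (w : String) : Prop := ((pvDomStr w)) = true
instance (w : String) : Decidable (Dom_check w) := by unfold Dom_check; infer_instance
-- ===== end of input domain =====

-- B rewrites A's index-window loop as a vowel/consonant class pattern plus substring search (objective: simpler).

-- ===== PORT A =====
-- module constant mo = {'a','i','e','o','u'} (a set of distinct chars; membership = contains)
def mo : List Char := ['a', 'i', 'e', 'o', 'u']

-- the for-loop with early returns; indices are always in range, so pyGetD is exact here
def checkLoop (cs : List Char) : List Int → Bool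
  | [] => true
  | i :: rest =>
    if mo.contains (PySem.List.pyGetD cs i ' ') && mo.contains (PySem.List.pyGetD cs (i+1) ' ')
        && mo.contains (PySem.List.pyGetD cs (i-1) ' ') then false
    else if !mo.contains (PySem.List.pyGetD cs i ' ') && !mo.contains (PySem.List.pyGetD cs (i+1) ' ')
        && !mo.contains (PySem.List.pyGetD cs (i-1) ' ') then false
    else checkLoop cs rest

def check (w : String) : Bool :=
  if !(PySem.Str.isIn "l" w) then false
  else checkLoop w.toList (PySem.List.pyRange 1 ((w.toList.length : Int) - 1) 1)

-- ===== PORT B =====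
-- ''.join(…) over the word ported as List.map producing the class pattern; 'VVV' in pat as isInfixOf
def check_alt (w : String) : Bool :=
  let pat : String := String.ofList (w.toList.map (fun c => if mo.contains c then 'V' else 'C'))
  PySem.Str.isIn "l" w && !(PySem.Str.isIn "VVV" pat) && !(PySem.Str.isIn "CCC" pat)

-- ===== PRECONDITION & SPEC =====
def Spec_check (w : String) (out : Bool) : Prop := out = check_alt w
instance (w : String) (out : Bool) : Decidable (Spec_check w out) := by unfold Spec_check; infer_instance

-- ===== CLAIM (what is proved, stated in full; the proofs are below) =====
def Claim_equal_check : Prop := ∀ (w : String), Dom_check w → Spec_check w (check w)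

-- ===== LEMMAS AND PROOFS =====

-- "no three consecutive equal classes", structurally
def noT : List Char → Bool
  | a :: b :: c :: t => if a == b && b == c then false else noT (b :: c :: t)
  | _ => true

def pat (cs : List Char) : List Char := cs.map (fun c => if mo.contains c then 'V' else 'C')

lemma noT_short (l : List Char) (h : l.length ≤ 2) : noT l = true := by
  match l with
  | [] => rfl
  | [_] => rfl
  | [_, _] => rfl
  | _ :: _ :: _ :: _ => simp at h

lemma loop_eq (cs : List Char) (k m : Nat) (hk : cs.length ≤ k + m) :
    checkLoop cs (PySem.List.pyRange ((m : Int) + 1) ((cs.length : Int) - 1) 1)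
      = noT ((pat cs).drop m) := by
  have hp : (pat cs).length = cs.length := by simp [pat]
  induction k generalizing m with
  | zero =>
    rw [PySem.List.pyRange_one_eq_nil (by omega)]
    rw [List.drop_eq_nil_of_le (by omega)]
    rfl
  | succ k ih =>
    by_cases hlen : cs.length ≤ m + 2
    · rw [PySem.List.pyRange_one_eq_nil (by omega)]
      rw [noT_short _ (by simp [hp]; omega)]
      rfl
    · have h0 : m < cs.length := by omega
      have h1 : m + 1 < cs.length := by omega
      have h2 : m + 2 < cs.length := by omega
      rw [PySem.List.pyRange_one_cons (by omega)]
      show (if _ then _ else _) = _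
      have e1 : (m : Int) + 1 = ((m + 1 : Nat) : Int) := by push_cast; ring
      have e2 : (m : Int) + 1 + 1 = ((m + 2 : Nat) : Int) := by push_cast; ring
      have e3 : (m : Int) + 1 - 1 = ((m : Nat) : Int) := by push_cast; ring
      rw [e2, e3, e1]
      rw [PySem.List.pyGetD_natCast, PySem.List.pyGetD_natCast, PySem.List.pyGetD_natCast]
      rw [List.getD_eq_getElem _ _ h0, List.getD_eq_getElem _ _ h1, List.getD_eq_getElem _ _ h2]
      rw [List.drop_eq_getElem_cons (by omega : m < (pat cs).length),
          List.drop_eq_getElem_cons (by omega : m + 1 < (pat cs).length),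
          List.drop_eq_getElem_cons (by omega : m + 2 < (pat cs).length)]
      show _ = noT (_ :: _ :: _ :: _)
      have g0 : (pat cs)[m]'(by omega) = if mo.contains (cs[m]'h0) then 'V' else 'C' := by
        simp [pat]
      have g1 : (pat cs)[m+1]'(by omega) = if mo.contains (cs[m+1]'h1) then 'V' else 'C' := by
        simp [pat]
      have g2 : (pat cs)[m+2]'(by omega) = if mo.contains (cs[m+2]'h2) then 'V' else 'C' := by
        simp [pat]
      rw [g0, g1, g2]
      have ihm := ih (m + 1) (by omega)
      have e4 : ((m + 1 : Nat) : Int) + 1 = ((m + 2 : Nat) : Int) := by push_cast; ring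
      rw [e4] at ihm

      rw [List.drop_eq_getElem_cons (by omega : m + 1 < (pat cs).length),
          List.drop_eq_getElem_cons (by omega : m + 2 < (pat cs).length), g1, g2] at ihm
      by_cases hb0 : cs[m]'h0 ∈ mo <;>
        by_cases hb1 : cs[m+1]'h1 ∈ mo <;>
          by_cases hb2 : cs[m+2]'h2 ∈ mo <;>
            simp [hb1, hb2] at ihm <;>
              simp [hb0, hb1, hb2, noT, ihm]

lemma noT_iff : ∀ (l : List Char), (∀ x ∈ l, x = 'V' ∨ x = 'C') →
    (noT l = true ↔ ¬ ['V','V','V'] <:+: l ∧ ¬ ['C','C','C'] <:+: l)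
  | [], _ => by simp [noT]
  | [a], h => by
    rcases h a (by simp) with rfl | rfl <;> simp [noT] <;> decide
  | [a, b], h => by
    rcases h a (by simp) with rfl | rfl <;> rcases h b (by simp) with rfl | rfl <;>
      simp [noT] <;> decide
  | a :: b :: c :: t, h => by
    have ih := noT_iff (b :: c :: t) (by intro x hx; exact h x (by simp at hx ⊢; tauto))
    have ha := h a (by simp)
    have hb := h b (by simp)
    have hc := h c (by simp)
    rcases ha with rfl | rfl <;> rcases hb with rfl | rfl <;> rcases hc with rfl | rfl <;>
      simp only [noT, List.infix_cons_iff, List.prefix_cons_iff] at ih ⊢ <;>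
        simp_all
termination_by l => l.length

-- ===== VERDICT (by name: the statement is the Claim_ definition above) =====
theorem check_spec : Claim_equal_check := by
  intro w _
  unfold Spec_check check check_alt
  cases hl : PySem.Str.isIn "l" w
  · simp
  · simp only [hl, Bool.not_true, Bool.false_eq_true, if_false, Bool.true_and]
    have hle := loop_eq w.toList w.toList.length 0 (by omega)
    simp only [Nat.cast_zero, zero_add] at hle
    rw [hle]
    have hcls : ∀ x ∈ pat w.toList, x = 'V' ∨ x = 'C' := by
      intro x hx; simp [pat] at hx; rcases hx with ⟨c, _, rfl⟩; split <;> simp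
    have hiv : PySem.Str.isIn "VVV" (String.ofList (pat w.toList)) = true ↔
        ['V','V','V'] <:+: pat w.toList := by
      rw [PySem.Str.isIn_iff_infix]; simp
    have hic : PySem.Str.isIn "CCC" (String.ofList (pat w.toList)) = true ↔
        ['C','C','C'] <:+: pat w.toList := by
      rw [PySem.Str.isIn_iff_infix]; simp
    have hn := noT_iff (pat w.toList) hcls
    show noT (pat w.toList) = (!PySem.Str.isIn "VVV" (String.ofList (pat w.toList)) &&
      !PySem.Str.isIn "CCC" (String.ofList (pat w.toList)))
    cases hV : PySem.Str.isIn "VVV" (String.ofList (pat w.toList)) <;>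
      cases hC : PySem.Str.isIn "CCC" (String.ofList (pat w.toList))
    · simp only [Bool.not_false, Bool.and_self]
      exact hn.mpr ⟨fun h => absurd (hiv.mpr h) (by rw [hV]; exact Bool.false_ne_true),
                    fun h => absurd (hic.mpr h) (by rw [hC]; exact Bool.false_ne_true)⟩
    · simp only [Bool.not_false, Bool.not_true, Bool.and_false]
      exact Bool.eq_false_iff.mpr (fun hT => (hn.mp hT).2 (hic.mp hC))
    · simp only [Bool.not_true, Bool.false_and]
      exact Bool.eq_false_iff.mpr (fun hT => (hn.mp hT).1 (hiv.mp hV))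
    · simp only [Bool.not_true, Bool.false_and]
      exact Bool.eq_false_iff.mpr (fun hT => (hn.mp hT).1 (hiv.mp hV))
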